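-- pv_equiv track=rewrite | github.com/skralg/Discord_IdleRPG | idlebot.py | item_parse
-- ===== SOURCE A (Python) =====
-- def item_parse(item: str):
--     """
--     Split prefix, level, and suffix from raw item string
--     :param item: string, item description
--     :return: list of 1 char, 1 integer, 1 char
--     """
--     prefix = ''
--     level = ''
--     suffix = ''
--     digits = '0123456789'
--     alphas = 'abcdefghijklmnopqrstuvwxyz'
--     stage = 0  # 0: prefix, 1: level, 2: suffix
--     for x in item:
--         if stage == 0 and x in alphas:
--             prefix = x
--             stage = 1
--             continue
--         elif stage == 0 and x in digits:
--             level += x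
--             stage = 1
--             continue
--         elif stage == 1 and x in digits:
--             level += x
--             continue
--         elif stage == 1 and x in alphas:
--             suffix = x
--             stage = 2
--     return [prefix, level, suffix]
-- ===== SOURCE B (Python) =====
-- DIGITS = '0123456789'
-- ALPHAS = 'abcdefghijklmnopqrstuvwxyz'
--
-- def item_parse(item: str):
--     # skip junk until the first lowercase letter or digit
--     chars = [c for c in item]
--     k = next((i for i, c in enumerate(chars) if c in ALPHAS or c in DIGITS), None)
--     if k is None:
--         return ['', '', '']
--     if chars[k] in ALPHAS:
--         prefix, rest = chars[k], chars[k + 1:]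
--     else:
--         prefix, rest = '', chars[k:]
--     # the suffix is the first lowercase letter of rest (if any);
--     # the level is every digit of rest occurring before it
--     j = next((i for i, c in enumerate(rest) if c in ALPHAS), len(rest))
--     suffix = rest[j] if j < len(rest) else ''
--     level = ''.join(c for c in rest[:j] if c in DIGITS)
--     return [prefix, level, suffix]
-- ===== Notes on version B (the rewrite author's own statement) =====
-- stated objective: simpler
-- what changed: Replaces A's three-stage state machine (mutable prefix/level/suffix/stage updated per character) with a stateless decomposition: skip junk to the first lowercase letter or digit, split off the prefix letter, then take the level as the digits occurring before the first lowercase letter of the rest, which is the suffix.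
import Mathlib
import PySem

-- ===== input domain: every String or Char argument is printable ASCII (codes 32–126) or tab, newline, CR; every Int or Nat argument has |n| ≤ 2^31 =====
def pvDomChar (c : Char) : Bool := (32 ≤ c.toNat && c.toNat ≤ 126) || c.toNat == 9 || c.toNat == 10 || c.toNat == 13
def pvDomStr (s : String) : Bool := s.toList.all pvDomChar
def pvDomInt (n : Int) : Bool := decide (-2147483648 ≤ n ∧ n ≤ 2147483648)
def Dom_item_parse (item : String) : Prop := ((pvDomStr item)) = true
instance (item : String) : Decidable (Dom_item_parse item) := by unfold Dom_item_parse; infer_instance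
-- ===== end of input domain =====

-- B replaces A's three-stage state machine by a stateless decomposition (skip junk,
-- split off the prefix letter, then take level digits up to the first letter = suffix);
-- objective: simpler, same cost.

-- ===== PORT A =====
def pvDigits : List Char := "0123456789".toList
def pvAlphas : List Char := "abcdefghijklmnopqrstuvwxyz".toList

-- the for-loop of A: state = (prefix, level, suffix, stage), branches in A's order
def pvLoopA : List Char → String → String → String → Nat → List String
  | [], p, l, s, _ => [p, l, s]
  | x :: xs, p, l, s, st =>
    if st = 0 ∧ pvAlphas.contains x then pvLoopA xs (String.ofList [x]) l s 1
    else if st = 0 ∧ pvDigits.contains x then pvLoopA xs p (l.push x) s 1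
    else if st = 1 ∧ pvDigits.contains x then pvLoopA xs p (l.push x) s 1
    else if st = 1 ∧ pvAlphas.contains x then pvLoopA xs p l (String.ofList [x]) 2
    else pvLoopA xs p l s st

def item_parse (item : String) : List String :=
  pvLoopA item.toList "" "" "" 0

-- ===== PORT B =====
def item_parse_alt (item : String) : List String :=
  -- skip junk until the first lowercase letter or digit (Source B: first index k, then slices)
  match item.toList.dropWhile (fun c => !(pvAlphas.contains c || pvDigits.contains c)) with
  | [] => ["", "", ""]
  | c :: cs =>
    let pr : String × List Char :=
      if pvAlphas.contains c then (String.ofList [c], cs) else ("", c :: cs)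
    -- suffix = first lowercase letter of rest; level = digits of rest before it
    let before := pr.2.takeWhile (fun c => !(pvAlphas.contains c))
    let suffix : String :=
      match pr.2.dropWhile (fun c => !(pvAlphas.contains c)) with
      | [] => ""
      | s :: _ => String.ofList [s]
    [pr.1, String.ofList (before.filter (fun c => pvDigits.contains c)), suffix]

-- ===== PRECONDITION & SPEC =====
def Spec_item_parse (item : String) (out : List String) : Prop := out = item_parse_alt item
instance (item : String) (out : List String) : Decidable (Spec_item_parse item out) := by unfold Spec_item_parse; infer_instance

-- ===== CLAIM (what is proved, stated in full; the proofs are below) =====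
def Claim_equal_item_parse : Prop := ∀ (item : String), Dom_item_parse item → Spec_item_parse item (item_parse item)

-- ===== LEMMAS AND PROOFS =====

lemma digit_not_alpha {x : Char} (h : x ∈ pvDigits) : x ∉ pvAlphas := by
  simp [pvDigits] at h
  rcases h with h | h | h | h | h | h | h | h | h | h <;> subst h <;> decide

lemma stage2 (cs : List Char) (p l s : String) : pvLoopA cs p l s 2 = [p, l, s] := by
  induction cs with
  | nil => rfl
  | cons x xs ih => simp [pvLoopA, ih]

lemma stage1 (cs : List Char) (p l : String) :
    pvLoopA cs p l "" 1 =
      [p,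
       String.ofList (l.toList ++ (cs.takeWhile (fun c => !(pvAlphas.contains c))).filter
          (fun c => pvDigits.contains c)),
       (match cs.dropWhile (fun c => !(pvAlphas.contains c)) with
        | [] => ""
        | s :: _ => String.ofList [s])] := by
  induction cs generalizing l with
  | nil => simp [pvLoopA]
  | cons x xs ih =>
    by_cases hd : x ∈ pvDigits
    · have ha := digit_not_alpha hd
      simp [pvLoopA, hd, ha, ih]
    · by_cases ha : x ∈ pvAlphas
      · simp [pvLoopA, hd, ha, stage2]
      · simp [pvLoopA, hd, ha, ih]

lemma stage0 (cs : List Char) :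
    pvLoopA cs "" "" "" 0 =
      pvLoopA (cs.dropWhile (fun c => !(pvAlphas.contains c || pvDigits.contains c))) "" "" "" 0 := by
  induction cs with
  | nil => rfl
  | cons x xs ih =>
    by_cases ha : x ∈ pvAlphas
    · simp [List.dropWhile, ha]
    · by_cases hd : x ∈ pvDigits
      · simp [List.dropWhile, ha, hd]
      · simp [pvLoopA, List.dropWhile, ha, hd, ih]

lemma head_dropWhile_false {p : Char → Bool} {l : List Char} {c : Char} {cs : List Char}
    (h : l.dropWhile p = c :: cs) : p c = false := by
  have := @List.head_dropWhile_not _ p l (by simp [h])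
  simpa [h] using this

-- ===== VERDICT (by name: the statement is the Claim_ definition above) =====
theorem item_parse_spec : Claim_equal_item_parse := by
  intro item _
  unfold Spec_item_parse item_parse item_parse_alt
  rw [stage0]
  rcases h : item.toList.dropWhile (fun c => !(pvAlphas.contains c || pvDigits.contains c)) with
    _ | ⟨c, cs⟩
  · rfl
  · have hc := head_dropWhile_false h
    simp only [Bool.not_eq_false', Bool.or_eq_true, List.contains_iff_mem] at hc
    by_cases ha : c ∈ pvAlphas
    · simp [pvLoopA, ha, stage1]
    · have hd : c ∈ pvDigits := hc.resolve_left ha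
      simp [pvLoopA, ha, hd, stage1]
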